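-- pv_equiv track=rewrite | github.com/yaronneuman/lazysloth | lazysloth/collectors/alias_collector.py | _find_most_specific_alias
-- ===== SOURCE A (Python) =====
-- from typing import Dict, List, Optional, Tuple
--
-- def _find_most_specific_alias(
--     command: str, aliases: Dict[str, Dict]
-- ) -> Optional[Tuple[str, Dict]]:
--     """Find the most specific alias that matches the given command."""
--     matches = []
--     # Find all matching aliases
--     for alias_name, alias_data in aliases.items():
--         alias_command = alias_data.get("command", "")
--
--         # Check if command starts with alias command (for commands with arguments)
--         if alias_command == command or command.startswith(alias_command + " "):
--             matches.append((alias_name, alias_data, len(alias_command)))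
--
--     if not matches:
--         return None
--     # Sort by length of alias command (descending) to prefer more specific aliases
--     # For example: "git commit -m" (length 13) over "git" (length 3)
--     matches.sort(key=lambda x: x[2], reverse=True)
--
--     # Return the most specific match
--     return matches[0][0], matches[0][1]
-- ===== SOURCE B (Python) =====
-- from typing import Dict, List, Optional, Tuple
--
-- def _find_most_specific_alias(
--     command: str, aliases: Dict[str, Dict]
-- ) -> Optional[Tuple[str, Dict]]:
--     """Single pass: track the longest matching alias; strict '>' keeps the first on ties."""
--     best_name = None
--     best_data = None
--     best_len = -1
--     for alias_name, alias_data in aliases.items():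
--         alias_command = alias_data.get("command", "")
--         if alias_command == command or command.startswith(alias_command + " "):
--             length = len(alias_command)
--             if length > best_len:
--                 best_name, best_data, best_len = alias_name, alias_data, length
--     if best_name is None:
--         return None
--     return best_name, best_data
-- ===== Notes on version B (the rewrite author's own statement) =====
-- stated objective: alternative
-- what changed: Replaced collect-all-matches-then-stable-reverse-sort-and-take-first with a single pass that keeps the current best (name, data, length) and updates only on a strictly longer match, so ties still resolve to the first-encountered alias and no match list or sort is needed.
import Mathlib
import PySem

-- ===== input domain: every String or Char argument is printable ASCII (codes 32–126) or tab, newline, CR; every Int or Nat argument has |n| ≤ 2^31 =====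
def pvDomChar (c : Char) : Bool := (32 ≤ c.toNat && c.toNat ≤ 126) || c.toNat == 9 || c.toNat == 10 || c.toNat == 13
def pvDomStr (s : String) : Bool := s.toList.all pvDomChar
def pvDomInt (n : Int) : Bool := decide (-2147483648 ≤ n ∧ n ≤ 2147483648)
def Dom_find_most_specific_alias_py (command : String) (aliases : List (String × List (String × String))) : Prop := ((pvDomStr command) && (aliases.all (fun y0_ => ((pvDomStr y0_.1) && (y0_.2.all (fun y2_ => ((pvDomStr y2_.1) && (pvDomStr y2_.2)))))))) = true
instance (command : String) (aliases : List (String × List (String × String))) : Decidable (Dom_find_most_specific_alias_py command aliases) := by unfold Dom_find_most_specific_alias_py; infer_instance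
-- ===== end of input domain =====

-- B replaces A's collect-ms_-then-stable-reverse-sort with a single pass keeping the
-- strictly-longest match (first on ties); an alternative one-pass algorithm, same results.


-- Both Pythons receive `aliases` as a dict of dicts: reading the association list through
-- Python's dict semantics (last value wins, first position kept) is part of decoding the
-- input, shared by both ports before their (different) algorithms start.
def pvAliasItems (aliases : List (String × List (String × String))) : List (String × List (String × String)) :=
  (PySem.Dict.ofList (aliases.map (fun p => (p.1, (PySem.Dict.ofList p.2).items)))).items

-- ===== PORT A =====
-- ms_.append + stable sort by length (reverse=True) + ms_[0]
def find_most_specific_alias_py (command : String) (aliases : List (String × List (String × String))) : Option (String × (List (String × String))) :=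
  let ms_ : List (String × List (String × String) × Int) :=
    (pvAliasItems aliases).foldl (fun acc p =>
      let alias_command := (PySem.Dict.mk p.2).getD "command" ""
      if alias_command == command || PySem.Str.startswith command (alias_command ++ " ")
      then acc ++ [(p.1, p.2, (PySem.Str.len alias_command : Int))] else acc) []
  if ms_.isEmpty then none
  else
    match PySem.List.sorted ms_ (fun x => x.2.2) true with
    | [] => none  -- unreachable: ms_ is nonempty
    | m :: _ => some (m.1, m.2.1)

-- ===== PORT B =====
-- single pass, state (best_name+best_data as an Option, best_len), strict '>' update
def find_most_specific_alias_py_alt (command : String) (aliases : List (String × List (String × String))) : Option (String × (List (String × String))) :=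
  let st :=
    (pvAliasItems aliases).foldl
      (fun (st : Option (String × List (String × String)) × Int) p =>
        let alias_command := (PySem.Dict.mk p.2).getD "command" ""
        if alias_command == command || PySem.Str.startswith command (alias_command ++ " ")
        then
          let length : Int := (PySem.Str.len alias_command : Int)
          if st.2 < length then (some (p.1, p.2), length) else st
        else st)
      (none, -1)
  st.1

-- ===== PRECONDITION & SPEC =====
def Spec_find_most_specific_alias_py (command : String) (aliases : List (String × List (String × String))) (out : Option (String × (List (String × String)))) : Prop := out = find_most_specific_alias_py_alt command aliases
instance (command : String) (aliases : List (String × List (String × String))) (out : Option (String × (List (String × String)))) : Decidable (Spec_find_most_specific_alias_py command aliases out) := by unfold Spec_find_most_specific_alias_py; infer_instance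

-- ===== CLAIM (what is proved, stated in full; the proofs are below) =====
def Claim_equal_find_most_specific_alias_py : Prop := ∀ (command : String) (aliases : List (String × List (String × String))), Dom_find_most_specific_alias_py command aliases → Spec_find_most_specific_alias_py command aliases (find_most_specific_alias_py command aliases)

-- ===== LEMMAS AND PROOFS =====

-- abbreviations used only by the proofs
def pvCond (command : String) (p : String × List (String × String)) : Bool :=
  let ac := (PySem.Dict.mk p.2).getD "command" ""
  ac == command || PySem.Str.startswith command (ac ++ " ")

def pvTrip (p : String × List (String × String)) : String × List (String × String) × Int :=
  (p.1, p.2, (PySem.Str.len ((PySem.Dict.mk p.2).getD "command" "") : Int))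

def pvGstep (s : Option (String × List (String × String) × Int)) (x : String × List (String × String) × Int) :
    Option (String × List (String × String) × Int) :=
  match s with
  | none => some x
  | some b => if b.2.2 < x.2.2 then some x else some b

def pvAbs (s : Option (String × List (String × String) × Int)) :
    Option (String × List (String × String)) × Int :=
  match s with
  | none => (none, -1)
  | some m => (some (m.1, m.2.1), m.2.2)

-- head of insertBy: x lands in front iff it beats the current head
theorem pv_head_insertBy {α : Type} (bef : α → α → Bool) (x : α) (acc : List α) :
    (PySem.List.insertBy bef x acc).head? =
      match acc.head? with
      | none => some x
      | some y => if bef x y then some x else some y := by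
  cases acc with
  | nil => simp [PySem.List.insertBy]
  | cons y ys => simp [PySem.List.insertBy]; split <;> simp

-- head of the insertion-sort fold = left fold of the strict-max step
theorem pv_head_foldl_insertBy (l : List (String × List (String × String) × Int))
    (acc : List (String × List (String × String) × Int)) :
    (l.foldl (fun acc x => PySem.List.insertBy (fun a b => decide (b.2.2 < a.2.2)) x acc) acc).head? =
      l.foldl pvGstep acc.head? := by
  induction l generalizing acc with
  | nil => rfl
  | cons x t ih =>
      simp only [List.foldl_cons, ih, pv_head_insertBy]
      congr 1
      cases acc.head? with
      | none => rfl
      | some y => simp [pvGstep]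

-- B's fold over the raw items = pvAbs of the strict-max fold over the ms_
theorem pv_alt_fold (command : String) (l : List (String × List (String × String)))
    (s : Option (String × List (String × String) × Int))
    (hs : ∀ m, s = some m → -1 ≤ m.2.2) :
    l.foldl
      (fun (st : Option (String × List (String × String)) × Int) p =>
        let alias_command := (PySem.Dict.mk p.2).getD "command" ""
        if alias_command == command || PySem.Str.startswith command (alias_command ++ " ")
        then
          let length : Int := (PySem.Str.len alias_command : Int)
          if st.2 < length then (some (p.1, p.2), length) else st
        else st)
      (pvAbs s) =
    pvAbs (((l.filter (pvCond command)).map pvTrip).foldl pvGstep s) := by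
  induction l generalizing s with
  | nil => rfl
  | cons p t ih =>
      by_cases hc : pvCond command p = true
      · have hc' := hc
        simp only [pvCond] at hc'
        simp only [List.foldl_cons, List.filter_cons, hc', hc, if_true, List.map_cons]
        have hstep :
            (if (pvAbs s).2 < (PySem.Str.len ((PySem.Dict.mk p.2).getD "command" "") : Int)
             then (some (p.1, p.2), (PySem.Str.len ((PySem.Dict.mk p.2).getD "command" "") : Int))
             else pvAbs s) = pvAbs (pvGstep s (pvTrip p)) := by
          cases s with
          | none =>
              simp only [pvAbs, pvGstep, pvTrip]
              rw [if_pos]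
              exact lt_of_lt_of_le (by norm_num) (Int.natCast_nonneg _)
          | some m =>
              simp only [pvAbs, pvGstep, pvTrip]
              split <;> simp
        rw [hstep, ih]
        intro m hm
        cases s with
        | none => cases hm; exact le_trans (by norm_num) (Int.natCast_nonneg _)
        | some b =>
            simp only [pvGstep] at hm
            split at hm <;> cases hm <;>
              first
                | exact le_trans (by norm_num) (Int.natCast_nonneg _)
                | exact hs _ rfl
      · have hc' : ¬ (((PySem.Dict.mk p.2).getD "command" "" == command) ||
            PySem.Str.startswith command ((PySem.Dict.mk p.2).getD "command" "" ++ " ")) = true := by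
          simpa [pvCond] using hc
        simp only [List.foldl_cons, List.filter_cons]
        rw [if_neg hc']
        simp only [hc, Bool.false_eq_true, if_false]
        exact ih s hs

-- ===== VERDICT (by name: the statement is the Claim_ definition above) =====
theorem find_most_specific_alias_py_spec : Claim_equal_find_most_specific_alias_py := by
  intro command aliases _
  unfold Spec_find_most_specific_alias_py
  unfold find_most_specific_alias_py find_most_specific_alias_py_alt
  set l := pvAliasItems aliases with hl
  have hmatch :
      l.foldl (fun acc p =>
        let alias_command := (PySem.Dict.mk p.2).getD "command" ""
        if alias_command == command || PySem.Str.startswith command (alias_command ++ " ")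
        then acc ++ [(p.1, p.2, (PySem.Str.len alias_command : Int))] else acc) [] =
      (l.filter (pvCond command)).map pvTrip := by
    simpa [pvCond, pvTrip] using
      PySem.List.foldl_append_if (pvCond command) pvTrip l []
  have halt := pv_alt_fold command l none (by intro m hm; cases hm)
  simp only [pvAbs] at halt
  rw [hmatch, halt]
  set ms := (l.filter (pvCond command)).map pvTrip with hms
  by_cases h : ms = []
  · simp [h]
  · rw [if_neg (by simpa [List.isEmpty_iff] using h)]
    have hhead :
        (PySem.List.sorted ms (fun x => x.2.2) true).head? = ms.foldl pvGstep none := by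
      rw [PySem.List.sorted_rev_eq_foldl_insertBy]
      simpa using pv_head_foldl_insertBy ms []
    have hne : PySem.List.sorted ms (fun x => x.2.2) true ≠ [] := by
      simpa [PySem.List.sorted_eq_nil_iff]
    cases hsor : PySem.List.sorted ms (fun x => x.2.2) true with
    | nil => exact absurd hsor hne
    | cons m t =>
        rw [hsor] at hhead
        simp only [List.head?_cons] at hhead
        rw [← hhead]
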